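-- pv_equiv track=rewrite | github.com/DionEngels/PLASMON_test_codes | test_norm.py | own_checker
-- ===== SOURCE A (Python) =====
-- def own_checker(g):
--
--     maximum = 0
--
--     for number in g:
--         if number > maximum:
--             maximum = number
--         elif -number > maximum:
--             maximum = -number
--
--     return maximum
-- ===== SOURCE B (Python) =====
-- def own_checker(g):
--     vals = list(g)
--     themax = max(vals, default=0)
--     themin = min(vals, default=0)
--     return max(themax, -themin, 0)
-- ===== Notes on version B (the rewrite author's own statement) =====
-- stated objective: alternative
-- what changed: Replaces A's single fused loop (running maximum with a >/negation branch) by two independent builtin extremal reductions, max and min of the materialized list, combined at the end as max(themax, -themin, 0).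
import Mathlib
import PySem

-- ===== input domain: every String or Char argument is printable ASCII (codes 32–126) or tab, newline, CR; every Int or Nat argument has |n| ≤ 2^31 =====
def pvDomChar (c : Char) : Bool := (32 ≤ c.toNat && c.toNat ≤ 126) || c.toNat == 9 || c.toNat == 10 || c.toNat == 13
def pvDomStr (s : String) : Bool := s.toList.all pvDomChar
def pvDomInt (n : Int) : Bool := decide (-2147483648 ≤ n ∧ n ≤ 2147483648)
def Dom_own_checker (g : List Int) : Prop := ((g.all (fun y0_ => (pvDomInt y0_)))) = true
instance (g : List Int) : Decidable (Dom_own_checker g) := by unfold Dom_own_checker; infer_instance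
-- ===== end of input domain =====

-- B replaces A's fused running-maximum loop by two independent max/min reductions combined at the end (alternative decomposition, same O(n) cost).


-- ===== PORT A =====
def own_checker (g : List Int) : Int :=
  g.foldl (fun maximum number =>
    if number > maximum then number
    else if -number > maximum then -number
    else maximum) 0

-- ===== PORT B =====
def own_checker_alt (g : List Int) : Int :=
  let themax := (PySem.List.max? g (fun y => y)).getD 0
  let themin := (PySem.List.min? g (fun y => y)).getD 0
  max (max themax (-themin)) 0

-- ===== PRECONDITION & SPEC =====
def Spec_own_checker (g : List Int) (out : Int) : Prop := out = own_checker_alt g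
instance (g : List Int) (out : Int) : Decidable (Spec_own_checker g out) := by unfold Spec_own_checker; infer_instance

-- ===== CLAIM (what is proved, stated in full; the proofs are below) =====
def Claim_equal_own_checker : Prop := ∀ (g : List Int), Dom_own_checker g → Spec_own_checker g (own_checker g)

-- ===== LEMMAS AND PROOFS =====

-- ===== VERDICT (by name: the statement is the Claim_ definition above) =====
lemma oc_step (m n : Int) (h : 0 ≤ m) :
    (if n > m then n else if -n > m then -n else m) = max m (max n (-n)) := by
  split_ifs <;> simp [max_def] <;> split_ifs <;> omega

lemma oc_loop (t : List Int) : ∀ (p q m : Int), m = max (max p (-q)) 0 →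
    t.foldl (fun maximum number =>
      if number > maximum then number
      else if -number > maximum then -number
      else maximum) m
    = max (max (t.foldl max p) (-(t.foldl min q))) 0 := by
  induction t with
  | nil => intro p q m hm; simpa using hm
  | cons n t ih =>
    intro p q m hm
    simp only [List.foldl_cons]
    apply ih
    rw [oc_step m n (by rw [hm]; exact le_max_right _ _), hm]
    simp [max_def, min_def]
    split_ifs <;> omega

theorem own_checker_spec : Claim_equal_own_checker := by
  intro g _
  unfold Spec_own_checker own_checker own_checker_alt
  cases g with
  | nil => simp [PySem.List.max?, PySem.List.min?]
  | cons x t =>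
    rw [PySem.List.max?_id_cons, PySem.List.min?_id_cons]
    simp only [Option.getD_some, List.foldl_cons]
    exact oc_loop t x x _ ((oc_step 0 x le_rfl).trans (max_comm _ _))
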